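-- pv_equiv track=rewrite | github.com/appleweiping/uncertainty-llm4rec | src/analysis/robustness_summary.py | infer_domain_model
-- ===== SOURCE A (Python) =====
-- def infer_domain_model(exp_name: str) -> tuple[str, str]:
--     tokens = [token.strip().lower() for token in exp_name.split("_") if token.strip()]
--     known_models = ["deepseek", "qwen", "kimi", "doubao", "glm", "gpt", "openai", "local"]
--     model = "unknown"
--     for token in reversed(tokens):
--         if token in known_models:
--             model = token
--             break
--
--     ignore_tokens = set(known_models) | {"small", "mini", "large", "clean", "noisy"}
--     domain_tokens = [token for token in tokens if token not in ignore_tokens]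
--     domain = domain_tokens[0] if domain_tokens else exp_name.lower()
--     if domain.startswith("movie"):
--         domain = "movies"
--     elif domain.startswith("book"):
--         domain = "books"
--     elif domain.startswith("electronic"):
--         domain = "electronics"
--     return domain, model
-- ===== SOURCE B (Python) =====
-- def infer_domain_model(exp_name: str) -> tuple[str, str]:
--     known_models = {"deepseek", "qwen", "kimi", "doubao", "glm", "gpt", "openai", "local"}
--     ignore_tokens = known_models | {"small", "mini", "large", "clean", "noisy"}
--     model = "unknown"
--     domain = None
--     for raw in exp_name.split("_"):
--         token = raw.strip()
--         if not token:
--             continue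
--         token = token.lower()
--         if token in known_models:
--             model = token
--         if domain is None and token not in ignore_tokens:
--             domain = token
--     if domain is None:
--         domain = exp_name.lower()
--     for prefix, norm in (("movie", "movies"), ("book", "books"), ("electronic", "electronics")):
--         if domain.startswith(prefix):
--             domain = norm
--             break
--     return domain, model
-- ===== Notes on version B (the rewrite author's own statement) =====
-- stated objective: alternative
-- what changed: A makes three separate passes over the tokens (a reverse scan with break for the model, a filter-then-index pass for the domain, an if/elif prefix chain); B fuses the model and domain computation into one forward loop over the raw split pieces maintaining (model, first-domain) state — model overwritten so the last known model wins — and replaces the elif chain with a prefix table loop.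
import Mathlib
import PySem

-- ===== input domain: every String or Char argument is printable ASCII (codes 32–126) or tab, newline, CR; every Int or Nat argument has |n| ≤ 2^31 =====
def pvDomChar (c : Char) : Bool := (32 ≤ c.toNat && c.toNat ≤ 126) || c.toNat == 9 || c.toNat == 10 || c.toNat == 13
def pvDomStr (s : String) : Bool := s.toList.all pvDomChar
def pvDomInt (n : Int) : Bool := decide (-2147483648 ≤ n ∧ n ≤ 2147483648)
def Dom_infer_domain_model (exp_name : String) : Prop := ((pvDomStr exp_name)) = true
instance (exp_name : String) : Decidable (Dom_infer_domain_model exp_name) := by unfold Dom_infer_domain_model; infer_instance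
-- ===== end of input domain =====

-- B fuses A's three passes over the tokens (reverse model scan, filter-then-index domain pass,
-- prefix elif-chain) into one forward fold with (model, first-domain) state plus a prefix table;
-- objective: alternative decomposition, same cost.


-- ===== PORT A =====
def aKnownModels : List String := ["deepseek", "qwen", "kimi", "doubao", "glm", "gpt", "openai", "local"]

def aIgnore : PySem.Set String :=
  PySem.Set.union (PySem.Set.ofList aKnownModels)
    (PySem.Set.ofList ["small", "mini", "large", "clean", "noisy"])

-- A's reverse for-loop with break: first known model when scanning from the right
def aFindModel : List String → String
  | [] => "unknown"
  | t :: rest => if t ∈ aKnownModels then t else aFindModel rest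

def infer_domain_model (exp_name : String) : String × String :=
  let tokens := (((PySem.Str.split? exp_name "_").getD []).filter
      (fun token => !(PySem.Str.strip token == ""))).map
      (fun token => PySem.Str.lower (PySem.Str.strip token))
  let model := aFindModel tokens.reverse
  let domain_tokens := tokens.filter (fun token => !(PySem.Set.contains aIgnore token))
  let domain := match domain_tokens with
    | [] => PySem.Str.lower exp_name
    | d :: _ => d
  let domain :=
    if PySem.Str.startswith domain "movie" then "movies"
    else if PySem.Str.startswith domain "book" then "books"
    else if PySem.Str.startswith domain "electronic" then "electronics"
    else domain
  (domain, model)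

-- ===== PORT B =====
def bKnownModels : PySem.Set String :=
  PySem.Set.ofList ["deepseek", "qwen", "kimi", "doubao", "glm", "gpt", "openai", "local"]

def bIgnore : PySem.Set String :=
  PySem.Set.union bKnownModels (PySem.Set.ofList ["small", "mini", "large", "clean", "noisy"])

-- one forward step of B's fused loop: state = (model so far, first domain token if any)
def bStep (st : String × Option String) (raw : String) : String × Option String :=
  let token := PySem.Str.strip raw
  if token == "" then st
  else
    let token := PySem.Str.lower token
    (if PySem.Set.contains bKnownModels token then token else st.1,
     match st.2 with
     | some d => some d
     | none => if !(PySem.Set.contains bIgnore token) then some token else none)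

-- B's prefix-normalization loop with break
def bNorm : List (String × String) → String → String
  | [], d => d
  | (p, n) :: rest, d => if PySem.Str.startswith d p then n else bNorm rest d

def infer_domain_model_alt (exp_name : String) : String × String :=
  let st := ((PySem.Str.split? exp_name "_").getD []).foldl bStep ("unknown", none)
  let domain := st.2.getD (PySem.Str.lower exp_name)
  let domain := bNorm [("movie", "movies"), ("book", "books"), ("electronic", "electronics")] domain
  (domain, st.1)

-- ===== PRECONDITION & SPEC =====
def Spec_infer_domain_model (exp_name : String) (out : String × String) : Prop := out = infer_domain_model_alt exp_name
instance (exp_name : String) (out : String × String) : Decidable (Spec_infer_domain_model exp_name out) := by unfold Spec_infer_domain_model; infer_instance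

-- ===== CLAIM (what is proved, stated in full; the proofs are below) =====
def Claim_equal_infer_domain_model : Prop := ∀ (exp_name : String), Dom_infer_domain_model exp_name → Spec_infer_domain_model exp_name (infer_domain_model exp_name)

-- ===== LEMMAS AND PROOFS =====

-- forward "last known model wins" scan, with explicit starting value
def lastK : List String → String → String
  | [], m => m
  | t :: rest, m => lastK rest (if PySem.Set.contains bKnownModels t then t else m)

-- A's reverse scan with explicit starting value
def aFindModelD : List String → String → String
  | [], m => m
  | t :: rest, m => if t ∈ aKnownModels then t else aFindModelD rest m

lemma bKnown_eq_aKnown : (bKnownModels : List String) = aKnownModels := by decide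

lemma aIgnore_eq_bIgnore : aIgnore = bIgnore := by decide

lemma aFindModelD_append (xs : List String) (t : String) (m : String) :
    aFindModelD (xs ++ [t]) m = aFindModelD xs (if t ∈ aKnownModels then t else m) := by
  induction xs generalizing m with
  | nil => simp [aFindModelD]
  | cons x xs ih => simp [aFindModelD, ih]

lemma lastK_eq_rev (l : List String) (m : String) : lastK l m = aFindModelD l.reverse m := by
  induction l generalizing m with
  | nil => rfl
  | cons t rest ih =>
      simp only [lastK, List.reverse_cons, aFindModelD_append, ih]
      have : PySem.Set.contains bKnownModels t = decide (t ∈ aKnownModels) := by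
        simp [PySem.Set.contains, bKnown_eq_aKnown, List.contains_eq_mem]
      rw [this]
      split <;> simp_all

lemma aFindModel_eq (l : List String) : aFindModel l = aFindModelD l "unknown" := by
  induction l with
  | nil => rfl
  | cons t rest ih => simp [aFindModel, aFindModelD, ih]

def toks (raws : List String) : List String :=
  (raws.filter (fun token => !(PySem.Str.strip token == ""))).map
    (fun token => PySem.Str.lower (PySem.Str.strip token))

def firstD (l : List String) (d0 : Option String) : Option String :=
  match d0 with
  | some d => some d
  | none => (l.filter (fun token => !(PySem.Set.contains aIgnore token))).head?

lemma foldl_bStep_char (raws : List String) (m0 : String) (d0 : Option String) :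
    raws.foldl bStep (m0, d0) = (lastK (toks raws) m0, firstD (toks raws) d0) := by
  induction raws generalizing m0 d0 with
  | nil => cases d0 <;> rfl
  | cons raw rest ih =>
      by_cases h : PySem.Str.strip raw = ""
      · simp [List.foldl_cons, bStep, h, toks, ih]
      · simp only [List.foldl_cons, bStep]
        have htoks : toks (raw :: rest) = PySem.Str.lower (PySem.Str.strip raw) :: toks rest := by
          simp [toks, h]
        rw [ih, htoks]
        cases d0 with
        | some d => simp [lastK, firstD, h]
        | none =>
            by_cases hig : PySem.Str.lower (PySem.Str.strip raw) ∈ bIgnore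
            · simp [lastK, firstD, h, hig, aIgnore_eq_bIgnore]
            · simp [lastK, firstD, h, hig, aIgnore_eq_bIgnore]

lemma headD_match (l : List String) (x : String) :
    (match l with | [] => x | d :: _ => d) = l.head?.getD x := by
  cases l <;> rfl

-- ===== VERDICT (by name: the statement is the Claim_ definition above) =====
theorem infer_domain_model_spec : Claim_equal_infer_domain_model := by
  intro exp_name _
  show _ = _
  unfold infer_domain_model infer_domain_model_alt
  rw [foldl_bStep_char]
  simp only [toks, firstD, aFindModel_eq, lastK_eq_rev, headD_match, bNorm]
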